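-- pv_equiv track=rewrite | github.com/PhillipSaint254/message-decoder | file decoder.py | create_pyramid
-- ===== SOURCE A (Python) =====
-- def create_pyramid(numbers):
--     pyramid = []
--     row_length = 1
--     current_index = 0
--     while current_index < len(numbers):
--         row = [str(numbers[current_index])]
--         current_index += 1
--         for j in range(1, row_length):
--             if current_index < len(numbers):
--                 row.append(str(numbers[current_index]))
--                 current_index += 1
--             else:
--                 break
--         pyramid.append(row)
--         row_length += 1
--     return pyramid
-- ===== SOURCE B (Python) =====
-- def create_pyramid(numbers):
--     pyramid = []
--     start = 0
--     k = 1
--     while start < len(numbers):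
--         pyramid.append([str(x) for x in numbers[start:start + k]])
--         start += k
--         k += 1
--     return pyramid
-- ===== Notes on version B (the rewrite author's own statement) =====
-- stated objective: simpler
-- what changed: Replaced the nested inner loop with a shared mutable index by slice-based chunking: a running start offset and row width k, appending [str(x) for x in numbers[start:start+k]] per row.
import Mathlib
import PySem

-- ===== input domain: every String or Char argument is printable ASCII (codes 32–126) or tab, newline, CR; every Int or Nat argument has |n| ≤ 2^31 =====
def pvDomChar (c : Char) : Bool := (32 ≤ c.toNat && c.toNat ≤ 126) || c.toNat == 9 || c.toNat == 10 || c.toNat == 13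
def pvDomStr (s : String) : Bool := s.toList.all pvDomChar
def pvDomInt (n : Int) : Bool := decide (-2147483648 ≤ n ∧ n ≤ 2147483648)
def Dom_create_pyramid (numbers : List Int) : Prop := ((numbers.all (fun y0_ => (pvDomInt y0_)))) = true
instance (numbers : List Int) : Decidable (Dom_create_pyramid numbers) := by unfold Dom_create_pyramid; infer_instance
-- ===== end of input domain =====

-- B replaces A's nested inner loop with a shared running index by slice-based chunking
-- (row k is numbers[start:start+k]); objective: simpler.

-- ===== PORT A =====
-- inner 'for j in range(1, row_length)' loop: cnt = remaining iterations (row_length - 1 at entry);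
-- numbers[current_index] is numbers.getD idx 0, exact since the branch guard gives idx < len.
def pvInnerA (numbers : List Int) (row : List String) (idx : Nat) (cnt : Nat) :
    List String × Nat :=
  match cnt with
  | 0 => (row, idx)
  | c + 1 =>
    if idx < numbers.length then
      pvInnerA numbers (row ++ [PySem.Int.toStr (numbers.getD idx 0)]) (idx + 1) c
    else (row, idx)

-- outer 'while current_index < len(numbers)' loop, state (pyramid, row_length, current_index)
def pvOuterA (numbers : List Int) (pyramid : List (List String))
    (row_length : Nat) (idx : Nat) : List (List String) :=
  if h : idx < numbers.length then
    let r := pvInnerA numbers [PySem.Int.toStr (numbers.getD idx 0)] (idx + 1) (row_length - 1)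
    pvOuterA numbers (pyramid ++ [r.1]) (row_length + 1) r.2
  else pyramid
termination_by numbers.length - idx
decreasing_by
  have : idx + 1 ≤ (pvInnerA numbers [PySem.Int.toStr (numbers.getD idx 0)] (idx + 1)
      (row_length - 1)).2 := by
    generalize idx + 1 = j
    generalize [PySem.Int.toStr (numbers.getD idx 0)] = row0
    induction row_length - 1 generalizing row0 j with
    | zero => simp [pvInnerA]
    | succ c ih =>
      simp only [pvInnerA]
      split
      · exact le_trans (Nat.le_succ j) (ih _ _)
      · exact le_refl j
  omega

def create_pyramid (numbers : List Int) : List (List String) :=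
  pvOuterA numbers [] 1 0

-- ===== PORT B =====
-- 'while start < len(numbers)' loop of Source B, state (pyramid, start, k); Python's width k ≥ 1 is
-- represented as k + 1 (k : Nat) so the running offset strictly increases (termination);
-- numbers[start:start+k] is PySem.List.slice.
def pvLoopB (numbers : List Int) (pyramid : List (List String))
    (start : Nat) (k : Nat) : List (List String) :=
  if h : start < numbers.length then
    pvLoopB numbers
      (pyramid ++ [(PySem.List.slice numbers (some (start : Int))
        (some ((start : Int) + ((k : Int) + 1)))).map PySem.Int.toStr])
      (start + (k + 1)) (k + 1)
  else pyramid
termination_by numbers.length - start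
decreasing_by omega

def create_pyramid_alt (numbers : List Int) : List (List String) :=
  pvLoopB numbers [] 0 0

-- ===== PRECONDITION & SPEC =====
def Spec_create_pyramid (numbers : List Int) (out : List (List String)) : Prop := out = create_pyramid_alt numbers
instance (numbers : List Int) (out : List (List String)) : Decidable (Spec_create_pyramid numbers out) := by unfold Spec_create_pyramid; infer_instance

-- ===== CLAIM (what is proved, stated in full; the proofs are below) =====
def Claim_equal_create_pyramid : Prop := ∀ (numbers : List Int), Dom_create_pyramid numbers → Spec_create_pyramid numbers (create_pyramid numbers)

-- ===== LEMMAS AND PROOFS =====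

-- A's inner loop collects the next cnt elements (clipped at the end) and reports where it stopped.
theorem pvInnerA_eq (numbers : List Int) (row : List String) (idx cnt : Nat)
    (hle : idx ≤ numbers.length) :
    pvInnerA numbers row idx cnt =
      (row ++ ((numbers.drop idx).take cnt).map PySem.Int.toStr,
       min (idx + cnt) numbers.length) := by
  induction cnt generalizing row idx with
  | zero =>
    simp only [pvInnerA, Nat.add_zero, List.take_zero, List.map_nil, List.append_nil]
    rw [Nat.min_eq_left hle]
  | succ c ih =>
    simp only [pvInnerA]
    split
    · rename_i h
      rw [ih _ _ (by omega)]
      rw [List.drop_eq_getElem_cons h]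
      simp only [List.take_succ_cons, List.map_cons, Prod.mk.injEq]
      constructor
      · simp [List.getElem?_eq_getElem h]
      · omega
    · rename_i h
      have : idx = numbers.length := by omega
      subst this
      simp

-- Each outer iteration of A (row_length = k + 1, index = start) matches one iteration of B's slice loop.
theorem pvOuter_eq_loopB (numbers : List Int) (fuel : Nat) :
    ∀ (pyramid : List (List String)) (start k : Nat),
      numbers.length - start ≤ fuel →
      pvOuterA numbers pyramid (k + 1) start = pvLoopB numbers pyramid start k := by
  induction fuel with
  | zero =>
    intro pyramid start k hf
    unfold pvOuterA pvLoopB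
    simp only [dif_neg (by omega : ¬ start < numbers.length)]
  | succ f ih =>
    intro pyramid start k hf
    unfold pvOuterA pvLoopB
    by_cases h : start < numbers.length
    · simp only [dif_pos h, Nat.add_sub_cancel]
      rw [pvInnerA_eq numbers _ (start + 1) k (by omega)]
      have hrow : ([PySem.Int.toStr (numbers.getD start 0)] ++
          ((numbers.drop (start + 1)).take k).map PySem.Int.toStr) =
          (PySem.List.slice numbers (some (start : Int))
            (some ((start : Int) + ((k : Int) + 1)))).map PySem.Int.toStr := by
        rw [show ((start : Int) + ((k : Int) + 1)) = ((start : Int) + ((k + 1 : Nat) : Int)) by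
              push_cast; ring,
            PySem.List.slice_natCast_add, List.drop_eq_getElem_cons h]
        simp [List.getElem?_eq_getElem h]
        rw [List.drop_eq_getElem_cons
          (show start < (numbers.map PySem.Int.toStr).length by simpa using h)]
        simp
      rw [hrow]
      by_cases h2 : start + (k + 1) <= numbers.length
      · rw [show min (start + 1 + k) numbers.length = start + (k + 1) by omega]
        exact ih _ _ (k + 1) (by omega)
      · rw [show min (start + 1 + k) numbers.length = numbers.length by omega]
        unfold pvOuterA pvLoopB
        simp only [dif_neg (by omega : ¬ numbers.length < numbers.length),
          dif_neg (by omega : ¬ start + (k + 1) < numbers.length)]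
    · simp only [dif_neg h]

-- ===== VERDICT (by name: the statement is the Claim_ definition above) =====
theorem create_pyramid_spec : Claim_equal_create_pyramid := by
  intro numbers _
  unfold Spec_create_pyramid create_pyramid create_pyramid_alt
  exact pvOuter_eq_loopB numbers numbers.length [] 0 0 (by omega)
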